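-- pv_equiv track=rewrite | github.com/sjv529-tech/EOY_intro_2_prog | analysis.py | binary_search_by_date
-- ===== SOURCE A (Python) =====
-- def binary_search_by_date(records, target_date):
--     """
--     Search for a record matching a target date prefix using binary search.
--     Records must be sorted by time before calling this.
--
--     Time Complexity:  O(log n) — halves search space each iteration
--     Space Complexity: O(1)     — no extra memory needed
--
--     Much faster than linear search O(n) on large datasets.
--
--     Args:
--         records (list): List of dicts sorted by 'time' key
--         target_date (str): Date string prefix e.g. '2026-04-14'
--     Returns:
--         list: All matching records for that date
--     """
--     if not records:
--         return []
--
--     lo, hi = 0, len(records) - 1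
--     matches = []
--
--     # Find any record matching the date
--     while lo <= hi:
--         mid = (lo + hi) // 2
--         record_date = records[mid]["time"][:10]  # take YYYY-MM-DD portion
--
--         if record_date == target_date:
--             # Found one match — expand outward to find all matches for that day
--             left = mid
--             while left > 0 and records[left - 1]["time"][:10] == target_date:
--                 left -= 1
--             right = mid
--             while right < len(records) - 1 and records[right + 1]["time"][:10] == target_date:
--                 right += 1
--             matches = records[left:right + 1]
--             break
--         elif record_date < target_date:
--             lo = mid + 1
--         else:
--             hi = mid - 1
--
--     return matches
-- ===== SOURCE B (Python) =====
-- def binary_search_by_date(records, target_date):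
--     # Two independent bisections: lower bound (first date >= target) and
--     # upper bound (first date > target); return the slice between them.
--     lo, hi = 0, len(records)
--     while lo < hi:
--         mid = (lo + hi) // 2
--         if records[mid]["time"][:10] < target_date:
--             lo = mid + 1
--         else:
--             hi = mid
--     start = lo
--     hi = len(records)
--     while lo < hi:
--         mid = (lo + hi) // 2
--         if records[mid]["time"][:10] <= target_date:
--             lo = mid + 1
--         else:
--             hi = mid
--     return records[start:lo]
-- ===== Notes on version B (the rewrite author's own statement) =====
-- stated objective: alternative
-- what changed: Replaced the single binary search followed by linear outward expansion over the matching block with two independent hand-written bisections (leftmost date >= target, leftmost date > target) and one slice between the two bounds.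
import Mathlib
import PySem

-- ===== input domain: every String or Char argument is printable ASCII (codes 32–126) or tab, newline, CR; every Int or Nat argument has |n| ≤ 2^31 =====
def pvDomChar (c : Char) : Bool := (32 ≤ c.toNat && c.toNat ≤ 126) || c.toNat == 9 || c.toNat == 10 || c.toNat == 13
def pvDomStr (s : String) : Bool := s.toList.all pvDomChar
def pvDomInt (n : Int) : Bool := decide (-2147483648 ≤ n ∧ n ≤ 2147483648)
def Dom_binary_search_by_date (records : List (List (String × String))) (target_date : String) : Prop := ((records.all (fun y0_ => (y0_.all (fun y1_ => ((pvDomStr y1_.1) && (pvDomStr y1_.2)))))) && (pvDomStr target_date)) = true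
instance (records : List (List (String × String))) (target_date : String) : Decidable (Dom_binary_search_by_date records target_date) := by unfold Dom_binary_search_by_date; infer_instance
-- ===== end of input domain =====

-- B replaces A's single binary search plus linear outward expansion by two independent
-- lower/upper-bound bisections and one slice (objective: alternative decomposition).

-- record["time"][:10] : first-match assoc lookup (dict items) then 10-char prefix
def pvTime (r : List (String × String)) : String :=
  ((r.find? (fun p => p.1 == "time")).map (fun p => p.2)).getD ""

def pvDT (r : List (String × String)) : String :=
  PySem.Str.slice (pvTime r) none (some 10)

def pvKey (records : List (List (String × String))) (i : Int) : List Char :=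
  (pvDT (PySem.List.pyGetD records i [])).toList

-- ===== PORT A =====
-- while left > 0 and records[left-1]["time"][:10] == target_date: left -= 1
-- (fuel is a totality device only; every call supplies enough of it)
def pvLeftA (records : List (List (String × String))) (target_date : String) (fuel : Nat) (left : Int) : Int :=
  match fuel with
  | 0 => left
  | fuel + 1 =>
    if 0 < left ∧ pvKey records (left - 1) = target_date.toList then
      pvLeftA records target_date fuel (left - 1)
    else left

-- while right < len(records) - 1 and records[right+1]["time"][:10] == target_date: right += 1
def pvRightA (records : List (List (String × String))) (target_date : String) (fuel : Nat) (right : Int) : Int :=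
  match fuel with
  | 0 => right
  | fuel + 1 =>
    if right < PySem.List.len records - 1 ∧ pvKey records (right + 1) = target_date.toList then
      pvRightA records target_date fuel (right + 1)
    else right

-- the main `while lo <= hi` loop of A
def pvLoopA (records : List (List (String × String))) (target_date : String) (fuel : Nat) (lo hi : Int) : List (List (String × String)) :=
  match fuel with
  | 0 => []
  | fuel + 1 =>
    if lo ≤ hi then
      let mid := PySem.Int.floordiv (lo + hi) 2
      if pvKey records mid = target_date.toList then
        PySem.List.slice records (some (pvLeftA records target_date records.length mid))
          (some (pvRightA records target_date records.length mid + 1))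
      else if pvKey records mid < target_date.toList then
        pvLoopA records target_date fuel (mid + 1) hi
      else
        pvLoopA records target_date fuel lo (mid - 1)
    else []

def binary_search_by_date (records : List (List (String × String))) (target_date : String) : List (List (String × String)) :=
  if records = [] then []
  else pvLoopA records target_date records.length 0 (PySem.List.len records - 1)

-- ===== PORT B =====
-- first loop of Source B: leftmost index whose date prefix is >= target_date
def pvLoB (records : List (List (String × String))) (target_date : String) (fuel : Nat) (lo hi : Int) : Int :=
  match fuel with
  | 0 => lo
  | fuel + 1 =>
    if lo < hi then
      let mid := PySem.Int.floordiv (lo + hi) 2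
      if pvKey records mid < target_date.toList then
        pvLoB records target_date fuel (mid + 1) hi
      else
        pvLoB records target_date fuel lo mid
    else lo

-- second loop of Source B: leftmost index whose date prefix is > target_date
def pvHiB (records : List (List (String × String))) (target_date : String) (fuel : Nat) (lo hi : Int) : Int :=
  match fuel with
  | 0 => lo
  | fuel + 1 =>
    if lo < hi then
      let mid := PySem.Int.floordiv (lo + hi) 2
      if pvKey records mid ≤ target_date.toList then
        pvHiB records target_date fuel (mid + 1) hi
      else
        pvHiB records target_date fuel lo mid
    else lo

def binary_search_by_date_alt (records : List (List (String × String))) (target_date : String) : List (List (String × String)) :=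
  let start := pvLoB records target_date records.length 0 (PySem.List.len records)
  let stop := pvHiB records target_date records.length start (PySem.List.len records)
  PySem.List.slice records (some start) (some stop)

-- ===== PRECONDITION & SPEC =====
-- Pre_ excludes records without a "time" key (A raises KeyError there) and record lists whose
-- date prefixes are not partitioned around target_date (every prefix < target_date before every
-- prefix = target_date before every prefix > target_date) — the part of the docstring's
-- "records must be sorted by time" precondition that the search needs; on unpartitioned input
-- A's bisection lands accidentally and its value is an artefact of the probe order.
def Pre_binary_search_by_date (records : List (List (String × String))) (target_date : String) : Prop :=
  (∀ r ∈ records, ((r.find? (fun p => p.1 == "time")).isSome = true)) ∧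
  List.Pairwise (fun a b : String =>
    (b.toList < target_date.toList → a.toList < target_date.toList) ∧
    (target_date.toList < a.toList → target_date.toList < b.toList)) (records.map pvDT)

instance (records : List (List (String × String))) (target_date : String) : Decidable (Pre_binary_search_by_date records target_date) := by
  unfold Pre_binary_search_by_date; infer_instance

def pvWitness_binary_search_by_date : (List (List (String × String))) × String :=
  ([[("time", "2026-04-14T09:00")], [("time", "2026-04-15T07:30")]], "2026-04-14")

def Spec_binary_search_by_date (records : List (List (String × String))) (target_date : String) (out : List (List (String × String))) : Prop := out = binary_search_by_date_alt records target_date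
instance (records : List (List (String × String))) (target_date : String) (out : List (List (String × String))) : Decidable (Spec_binary_search_by_date records target_date out) := by unfold Spec_binary_search_by_date; infer_instance

-- ===== CLAIM (what is proved, stated in full; the proofs are below) =====
def Claim_equal_binary_search_by_date : Prop := ∀ (records : List (List (String × String))) (target_date : String), Dom_binary_search_by_date records target_date → Pre_binary_search_by_date records target_date → Spec_binary_search_by_date records target_date (binary_search_by_date records target_date)

-- ===== LEMMAS AND PROOFS =====

lemma pv_key_part (records : List (List (String × String))) (target_date : String)
    (hp : List.Pairwise (fun a b : String =>
      (b.toList < target_date.toList → a.toList < target_date.toList) ∧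
      (target_date.toList < a.toList → target_date.toList < b.toList)) (records.map pvDT)) :
    ∀ i j : Int, 0 ≤ i → i ≤ j → j < (records.length : Int) →
      (pvKey records j < target_date.toList → pvKey records i < target_date.toList) ∧
      (target_date.toList < pvKey records i → target_date.toList < pvKey records j) := by
  intro i j hi hij hj
  have hi' : i < (records.length : Int) := lt_of_le_of_lt hij hj
  have hKi : pvKey records i = (pvDT (records[i.toNat]'(by omega))).toList := by
    unfold pvKey
    rw [PySem.List.pyGetD_eq_getElem records [] hi hi']
  have hKj : pvKey records j = (pvDT (records[j.toNat]'(by omega))).toList := by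
    unfold pvKey
    rw [PySem.List.pyGetD_eq_getElem records [] (by omega) hj]
  rcases eq_or_lt_of_le hij with rfl | hlt
  · rw [hKi.trans hKj.symm]
    exact ⟨id, id⟩
  · have h := List.pairwise_iff_getElem.mp hp i.toNat j.toNat
      (by simpa using (by omega : i.toNat < records.length))
      (by simpa using (by omega : j.toNat < records.length)) (by omega)
    rw [hKi, hKj]
    simpa using h

lemma pv_loB_spec (records : List (List (String × String))) (target_date : String)
    (hs : ∀ i j : Int, 0 ≤ i → i ≤ j → j < (records.length : Int) →
      (pvKey records j < target_date.toList → pvKey records i < target_date.toList) ∧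
      (target_date.toList < pvKey records i → target_date.toList < pvKey records j))
    (fuel : Nat) :
    ∀ lo hi : Int, 0 ≤ lo → lo ≤ hi → hi ≤ (records.length : Int) → (hi - lo).toNat ≤ fuel →
    (∀ i : Int, 0 ≤ i → i < lo → pvKey records i < target_date.toList) →
    (∀ i : Int, hi ≤ i → i < (records.length : Int) → ¬ pvKey records i < target_date.toList) →
    lo ≤ pvLoB records target_date fuel lo hi ∧ pvLoB records target_date fuel lo hi ≤ hi ∧
    (∀ i : Int, 0 ≤ i → i < pvLoB records target_date fuel lo hi → pvKey records i < target_date.toList) ∧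
    (∀ i : Int, pvLoB records target_date fuel lo hi ≤ i → i < (records.length : Int) →
      ¬ pvKey records i < target_date.toList) := by
  induction fuel with
  | zero =>
    intro lo hi h0 hlh hn hf hL hR
    simp only [pvLoB]
    exact ⟨le_refl lo, hlh, hL, fun i hli hin => hR i (by omega) hin⟩
  | succ fuel ih =>
    intro lo hi h0 hlh hn hf hL hR
    simp only [pvLoB]
    by_cases h : lo < hi
    · simp only [if_pos h]
      have hmid : PySem.Int.floordiv (lo + hi) 2 = (lo + hi) / 2 :=
        PySem.Int.floordiv_eq_ediv_of_pos (by norm_num)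
      by_cases hk : pvKey records (PySem.Int.floordiv (lo + hi) 2) < target_date.toList
      · simp only [if_pos hk]
        have hL' : ∀ i : Int, 0 ≤ i → i < PySem.Int.floordiv (lo + hi) 2 + 1 →
            pvKey records i < target_date.toList := by
          intro i hi0 hilt
          exact (hs i (PySem.Int.floordiv (lo + hi) 2) hi0 (by omega) (by omega)).1 hk
        have h1 := ih (PySem.Int.floordiv (lo + hi) 2 + 1) hi
          (by omega) (by omega) hn (by omega) hL' hR
        exact ⟨le_trans (by omega) h1.1, h1.2⟩
      · simp only [if_neg hk]
        have hR' : ∀ i : Int, PySem.Int.floordiv (lo + hi) 2 ≤ i → i < (records.length : Int) →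
            ¬ pvKey records i < target_date.toList := by
          intro i him hin hc
          exact hk ((hs (PySem.Int.floordiv (lo + hi) 2) i (by omega) him hin).1 hc)
        have h1 := ih lo (PySem.Int.floordiv (lo + hi) 2)
          h0 (by omega) (by omega) (by omega) hL hR'
        exact ⟨h1.1, le_trans h1.2.1 (by omega), h1.2.2⟩
    · simp only [if_neg h]
      exact ⟨le_refl lo, hlh, hL, fun i hli hin => hR i (by omega) hin⟩

lemma pv_hiB_spec (records : List (List (String × String))) (target_date : String)
    (hs : ∀ i j : Int, 0 ≤ i → i ≤ j → j < (records.length : Int) →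
      (pvKey records j < target_date.toList → pvKey records i < target_date.toList) ∧
      (target_date.toList < pvKey records i → target_date.toList < pvKey records j))
    (fuel : Nat) :
    ∀ lo hi : Int, 0 ≤ lo → lo ≤ hi → hi ≤ (records.length : Int) → (hi - lo).toNat ≤ fuel →
    (∀ i : Int, 0 ≤ i → i < lo → pvKey records i ≤ target_date.toList) →
    (∀ i : Int, hi ≤ i → i < (records.length : Int) → ¬ pvKey records i ≤ target_date.toList) →
    lo ≤ pvHiB records target_date fuel lo hi ∧ pvHiB records target_date fuel lo hi ≤ hi ∧
    (∀ i : Int, 0 ≤ i → i < pvHiB records target_date fuel lo hi → pvKey records i ≤ target_date.toList) ∧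
    (∀ i : Int, pvHiB records target_date fuel lo hi ≤ i → i < (records.length : Int) →
      ¬ pvKey records i ≤ target_date.toList) := by
  induction fuel with
  | zero =>
    intro lo hi h0 hlh hn hf hL hR
    simp only [pvHiB]
    exact ⟨le_refl lo, hlh, hL, fun i hli hin => hR i (by omega) hin⟩
  | succ fuel ih =>
    intro lo hi h0 hlh hn hf hL hR
    simp only [pvHiB]
    by_cases h : lo < hi
    · simp only [if_pos h]
      have hmid : PySem.Int.floordiv (lo + hi) 2 = (lo + hi) / 2 :=
        PySem.Int.floordiv_eq_ediv_of_pos (by norm_num)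
      by_cases hk : pvKey records (PySem.Int.floordiv (lo + hi) 2) ≤ target_date.toList
      · simp only [if_pos hk]
        have hL' : ∀ i : Int, 0 ≤ i → i < PySem.Int.floordiv (lo + hi) 2 + 1 →
            pvKey records i ≤ target_date.toList := by
          intro i hi0 hilt
          exact not_lt.mp (fun hgt => absurd
            ((hs i (PySem.Int.floordiv (lo + hi) 2) hi0 (by omega) (by omega)).2 hgt)
            (not_lt.mpr hk))
        have h1 := ih (PySem.Int.floordiv (lo + hi) 2 + 1) hi
          (by omega) (by omega) hn (by omega) hL' hR
        exact ⟨le_trans (by omega) h1.1, h1.2⟩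
      · simp only [if_neg hk]
        have hR' : ∀ i : Int, PySem.Int.floordiv (lo + hi) 2 ≤ i → i < (records.length : Int) →
            ¬ pvKey records i ≤ target_date.toList := by
          intro i him hin hc
          exact absurd ((hs (PySem.Int.floordiv (lo + hi) 2) i (by omega) him hin).2
            (not_le.mp hk)) (not_lt.mpr hc)
        have h1 := ih lo (PySem.Int.floordiv (lo + hi) 2)
          h0 (by omega) (by omega) (by omega) hL hR'
        exact ⟨h1.1, le_trans h1.2.1 (by omega), h1.2.2⟩
    · simp only [if_neg h]
      exact ⟨le_refl lo, hlh, hL, fun i hli hin => hR i (by omega) hin⟩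

lemma pv_leftA_spec (records : List (List (String × String))) (target_date : String)
    (fuel : Nat) :
    ∀ l : Int, 0 ≤ l → l.toNat ≤ fuel → pvKey records l = target_date.toList →
    0 ≤ pvLeftA records target_date fuel l ∧ pvLeftA records target_date fuel l ≤ l ∧
    pvKey records (pvLeftA records target_date fuel l) = target_date.toList ∧
    (pvLeftA records target_date fuel l = 0 ∨
      pvKey records (pvLeftA records target_date fuel l - 1) ≠ target_date.toList) := by
  induction fuel with
  | zero =>
    intro l h0 hf hK
    simp only [pvLeftA]
    exact ⟨h0, le_refl l, hK, Or.inl (by omega)⟩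
  | succ fuel ih =>
    intro l h0 hf hK
    simp only [pvLeftA]
    by_cases h : 0 < l ∧ pvKey records (l - 1) = target_date.toList
    · simp only [if_pos h]
      have h1 := ih (l - 1) (by omega) (by omega) h.2
      exact ⟨h1.1, by omega, h1.2.2⟩
    · simp only [if_neg h]
      rcases not_and_or.mp h with h1 | h1
      · exact ⟨h0, le_refl l, hK, Or.inl (by omega)⟩
      · exact ⟨h0, le_refl l, hK, Or.inr h1⟩

lemma pv_rightA_spec (records : List (List (String × String))) (target_date : String)
    (fuel : Nat) :
    ∀ r : Int, r < (records.length : Int) → ((records.length : Int) - 1 - r).toNat ≤ fuel →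
    pvKey records r = target_date.toList →
    r ≤ pvRightA records target_date fuel r ∧
    pvRightA records target_date fuel r < (records.length : Int) ∧
    pvKey records (pvRightA records target_date fuel r) = target_date.toList ∧
    (pvRightA records target_date fuel r = (records.length : Int) - 1 ∨
      pvKey records (pvRightA records target_date fuel r + 1) ≠ target_date.toList) := by
  induction fuel with
  | zero =>
    intro r hrn hf hK
    simp only [pvRightA]
    exact ⟨le_refl r, hrn, hK, Or.inl (by omega)⟩
  | succ fuel ih =>
    intro r hrn hf hK
    simp only [pvRightA]
    have hlen : PySem.List.len records = (records.length : Int) := PySem.List.len_eq records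
    by_cases h : r < PySem.List.len records - 1 ∧ pvKey records (r + 1) = target_date.toList
    · simp only [if_pos h]
      have h1 := ih (r + 1) (by omega) (by omega) h.2
      exact ⟨by omega, h1.2⟩
    · simp only [if_neg h]
      rcases not_and_or.mp h with h1 | h1
      · exact ⟨le_refl r, hrn, hK, Or.inl (by omega)⟩
      · exact ⟨le_refl r, hrn, hK, Or.inr h1⟩

lemma pv_slice_self (records : List (List (String × String))) (a : Int) (ha : 0 ≤ a) :
    PySem.List.slice records (some a) (some a) = [] := by
  rw [PySem.List.slice_toNat records ha ha]
  simp

lemma pv_loopA_spec (records : List (List (String × String))) (target_date : String)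
    (hs : ∀ i j : Int, 0 ≤ i → i ≤ j → j < (records.length : Int) →
      (pvKey records j < target_date.toList → pvKey records i < target_date.toList) ∧
      (target_date.toList < pvKey records i → target_date.toList < pvKey records j))
    (lb ub : Int) (hlb0 : 0 ≤ lb) (hlbub : lb ≤ ub) (hubn : ub ≤ (records.length : Int))
    (P1 : ∀ i : Int, 0 ≤ i → i < lb → pvKey records i < target_date.toList)
    (P2 : ∀ i : Int, lb ≤ i → i < (records.length : Int) → ¬ pvKey records i < target_date.toList)
    (Q1 : ∀ i : Int, 0 ≤ i → i < ub → pvKey records i ≤ target_date.toList)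
    (Q2 : ∀ i : Int, ub ≤ i → i < (records.length : Int) → ¬ pvKey records i ≤ target_date.toList)
    (fuel : Nat) :
    ∀ lo hi : Int, 0 ≤ lo → hi ≤ (records.length : Int) - 1 → (hi - lo + 1).toNat ≤ fuel →
    (∀ i : Int, 0 ≤ i → i < lo → pvKey records i ≠ target_date.toList) →
    (∀ i : Int, hi < i → i < (records.length : Int) → pvKey records i ≠ target_date.toList) →
    pvLoopA records target_date fuel lo hi = PySem.List.slice records (some lb) (some ub) := by
  have hempty : ∀ lo hi : Int, ¬ lo ≤ hi →
      (∀ i : Int, 0 ≤ i → i < lo → pvKey records i ≠ target_date.toList) →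
      (∀ i : Int, hi < i → i < (records.length : Int) → pvKey records i ≠ target_date.toList) →
      ([] : List (List (String × String))) = PySem.List.slice records (some lb) (some ub) := by
    intro lo hi h hL hR
    have hlbeq : lb = ub := by
      by_contra hne
      have hlt : lb < ub := lt_of_le_of_ne hlbub hne
      have h1 : pvKey records lb = target_date.toList :=
        le_antisymm (Q1 lb hlb0 hlt) (not_lt.mp (P2 lb (le_refl lb) (by omega)))
      by_cases h2 : lb < lo
      · exact hL lb hlb0 h2 h1
      · exact hR lb (by omega) (by omega) h1
    rw [hlbeq, pv_slice_self records ub (by omega)]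
  induction fuel with
  | zero =>
    intro lo hi h0 hn hf hL hR
    simp only [pvLoopA]
    exact hempty lo hi (by omega) hL hR
  | succ fuel ih =>
    intro lo hi h0 hn hf hL hR
    simp only [pvLoopA]
    by_cases h : lo ≤ hi
    · simp only [if_pos h]
      have hmid : PySem.Int.floordiv (lo + hi) 2 = (lo + hi) / 2 :=
        PySem.Int.floordiv_eq_ediv_of_pos (by norm_num)
      by_cases hk : pvKey records (PySem.Int.floordiv (lo + hi) 2) = target_date.toList
      · simp only [if_pos hk]
        obtain ⟨hl0, hlm, hlK, hlB⟩ :=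
          pv_leftA_spec records target_date records.length (PySem.Int.floordiv (lo + hi) 2)
            (by omega) (by omega) hk
        obtain ⟨hmr, hrn, hrK, hrB⟩ :=
          pv_rightA_spec records target_date records.length (PySem.Int.floordiv (lo + hi) 2)
            (by omega) (by omega) hk
        have hleq : pvLeftA records target_date records.length (PySem.Int.floordiv (lo + hi) 2) = lb := by
          rcases lt_trichotomy (pvLeftA records target_date records.length (PySem.Int.floordiv (lo + hi) 2)) lb with
            hlt | heq | hgt
          · exact absurd hlK (ne_of_lt (P1 _ hl0 hlt))
          · exact heq
          · have hKle : pvKey records (pvLeftA records target_date records.length (PySem.Int.floordiv (lo + hi) 2) - 1)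
                ≤ target_date.toList := by
              refine not_lt.mp (fun hgt => ?_)
              have h3 := (hs (pvLeftA records target_date records.length (PySem.Int.floordiv (lo + hi) 2) - 1)
                (PySem.Int.floordiv (lo + hi) 2) (by omega) (by omega) (by omega)).2 hgt
              rw [hk] at h3
              exact lt_irrefl _ h3
            have hKge : ¬ pvKey records
                (pvLeftA records target_date records.length (PySem.Int.floordiv (lo + hi) 2) - 1) < target_date.toList :=
              P2 (pvLeftA records target_date records.length (PySem.Int.floordiv (lo + hi) 2) - 1)
                (by omega) (by omega)
            have heqt : pvKey records
                (pvLeftA records target_date records.length (PySem.Int.floordiv (lo + hi) 2) - 1) = target_date.toList :=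
              le_antisymm hKle (not_lt.mp hKge)
            rcases hlB with h2 | h2
            · exact absurd h2 (by omega)
            · exact absurd heqt h2
        have hreq : pvRightA records target_date records.length (PySem.Int.floordiv (lo + hi) 2) + 1 = ub := by
          rcases lt_trichotomy (pvRightA records target_date records.length (PySem.Int.floordiv (lo + hi) 2) + 1) ub
            with hlt | heq | hgt
          · have hKle : pvKey records (pvRightA records target_date records.length (PySem.Int.floordiv (lo + hi) 2) + 1)
                ≤ target_date.toList := Q1 _ (by omega) hlt
            have hKge : target_date.toList ≤ pvKey records
                (pvRightA records target_date records.length (PySem.Int.floordiv (lo + hi) 2) + 1) := by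
              refine not_lt.mp (fun hlt' => ?_)
              have h3 := (hs (pvRightA records target_date records.length (PySem.Int.floordiv (lo + hi) 2))
                (pvRightA records target_date records.length (PySem.Int.floordiv (lo + hi) 2) + 1)
                (by omega) (by omega) (by omega)).1 hlt'
              rw [hrK] at h3
              exact lt_irrefl _ h3
            have heqt : pvKey records
                (pvRightA records target_date records.length (PySem.Int.floordiv (lo + hi) 2) + 1) = target_date.toList :=
              le_antisymm hKle hKge
            rcases hrB with h2 | h2
            · exact absurd h2 (by omega)
            · exact absurd heqt h2
          · exact heq
          · exact absurd (le_of_eq hrK)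
              (Q2 (pvRightA records target_date records.length (PySem.Int.floordiv (lo + hi) 2)) (by omega) hrn)
        rw [hleq, hreq]
      · simp only [if_neg hk]
        by_cases hk2 : pvKey records (PySem.Int.floordiv (lo + hi) 2) < target_date.toList
        · simp only [if_pos hk2]
          have hL' : ∀ i : Int, 0 ≤ i → i < PySem.Int.floordiv (lo + hi) 2 + 1 →
              pvKey records i ≠ target_date.toList := by
            intro i hi0 hilt
            exact ne_of_lt ((hs i (PySem.Int.floordiv (lo + hi) 2) hi0 (by omega) (by omega)).1 hk2)
          exact ih (PySem.Int.floordiv (lo + hi) 2 + 1) hi (by omega) hn (by omega) hL' hR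
        · simp only [if_neg hk2]
          have hgt : target_date.toList < pvKey records (PySem.Int.floordiv (lo + hi) 2) :=
            lt_of_le_of_ne (not_lt.mp hk2) (fun he => hk he.symm)
          have hR' : ∀ i : Int, PySem.Int.floordiv (lo + hi) 2 - 1 < i → i < (records.length : Int) →
              pvKey records i ≠ target_date.toList := by
            intro i him hin he
            have hle := (hs (PySem.Int.floordiv (lo + hi) 2) i (by omega) (by omega) hin).2 hgt
            rw [he] at hle
            exact lt_irrefl _ hle
          exact ih lo (PySem.Int.floordiv (lo + hi) 2 - 1) h0 (by omega) (by omega) hL hR'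
    · simp only [if_neg h]
      exact hempty lo hi h hL hR

-- ===== VERDICT (by name: the statement is the Claim_ definition above) =====
theorem binary_search_by_date_spec : Claim_equal_binary_search_by_date := by
  intro records target_date _hdom hpre
  obtain ⟨_hkeys, hsort⟩ := hpre
  have hs := pv_key_part records target_date hsort
  unfold Spec_binary_search_by_date binary_search_by_date binary_search_by_date_alt
  simp only [PySem.List.len_eq]
  obtain ⟨hLB1, hLB2, P1, P2⟩ :=
    pv_loB_spec records target_date hs records.length 0 (records.length : Int) (le_refl 0)
      (by omega) (le_refl _) (by omega)
      (by intro i h1 h2; exact absurd h2 (by omega))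
      (by intro i h1 h2; exact absurd h2 (by omega))
  obtain ⟨hUB1, hUB2, Q1, Q2⟩ :=
    pv_hiB_spec records target_date hs records.length
      (pvLoB records target_date records.length 0 (records.length : Int))
      (records.length : Int) (by omega) hLB2 (le_refl _) (by omega)
      (fun i hi0 hilt => le_of_lt (P1 i hi0 hilt))
      (by intro i h1 h2; exact absurd h2 (by omega))
  by_cases hnil : records = []
  · subst hnil
    rw [if_pos rfl]
    simp only [List.length_nil, Nat.cast_zero] at hLB1 hLB2 hUB1 hUB2 ⊢
    have hlb : pvLoB [] target_date 0 0 0 = 0 := le_antisymm hLB2 hLB1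
    rw [hlb] at hUB1 hUB2 ⊢
    have hub : pvHiB [] target_date 0 0 0 = 0 := le_antisymm hUB2 hUB1
    rw [hub]
    exact (pv_slice_self [] 0 (le_refl 0)).symm
  · rw [if_neg hnil]
    have hlen : 0 < records.length := List.length_pos_iff.mpr hnil
    exact pv_loopA_spec records target_date hs _ _ hLB1 hUB1 hUB2 P1 P2 Q1 Q2
      records.length 0 ((records.length : Int) - 1) (le_refl 0) (le_refl _) (by omega)
      (by intro i h1 h2; exact absurd h2 (by omega))
      (by intro i h1 h2; exact absurd h2 (by omega))
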